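-- pv_equiv track=rewrite | github.com/Tiefen-boop/OpenCV_Hazit | helpFunctions.py | limit_lines_to_relevant_edges
-- ===== SOURCE A (Python) =====
-- def limit_lines_to_relevant_edges(lines, threshold=1):
--     for lineInd in range(len(lines)):
--         line = lines[lineInd]
--         startInd = len(line)
--         for pointInd in range(len(line)):
--             if line[pointInd][2] >= threshold:
--                 startInd = pointInd
--                 break
--         line = line[startInd:]
--         lines[lineInd] = line
--         for pointInd in range(len(line) - 1, 0, -1):
--             if line[pointInd][2] >= threshold:
--                 lines[lineInd] = line[0:pointInd]
--                 break
--     return lines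
-- ===== SOURCE B (Python) =====
-- def limit_lines_to_relevant_edges(lines, threshold=1):
--     for i, line in enumerate(lines):
--         q = [j for j in range(len(line)) if line[j][2] >= threshold]
--         if not q:
--             lines[i] = line[len(line):]
--         elif len(q) == 1:
--             lines[i] = line[q[0]:]
--         else:
--             lines[i] = line[q[0]:q[-1]]
--     return lines
-- ===== Notes on version B (the rewrite author's own statement) =====
-- stated objective: simpler
-- what changed: A's two early-breaking directional scans (forward for the first qualifying point, backward for the last) are replaced by one comprehension collecting all qualifying indices q, after which the result is a single slice of the original line determined by q's endpoints (empty / single / first-to-last-exclusive).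
import Mathlib
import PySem

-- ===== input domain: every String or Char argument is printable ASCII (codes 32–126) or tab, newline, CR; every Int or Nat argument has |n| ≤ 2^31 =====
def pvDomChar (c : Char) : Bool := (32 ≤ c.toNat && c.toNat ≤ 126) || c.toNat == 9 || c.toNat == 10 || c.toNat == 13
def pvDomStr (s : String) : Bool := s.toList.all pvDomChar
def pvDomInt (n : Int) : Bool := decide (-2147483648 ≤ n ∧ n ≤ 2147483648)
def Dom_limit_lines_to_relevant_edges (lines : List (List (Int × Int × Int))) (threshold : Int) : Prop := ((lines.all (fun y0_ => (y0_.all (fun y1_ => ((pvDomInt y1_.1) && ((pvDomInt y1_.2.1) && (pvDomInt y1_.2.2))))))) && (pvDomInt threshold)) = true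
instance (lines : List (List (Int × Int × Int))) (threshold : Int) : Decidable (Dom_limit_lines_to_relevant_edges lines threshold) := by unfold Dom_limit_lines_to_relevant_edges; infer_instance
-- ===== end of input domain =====

-- B replaces A's two early-breaking directional scans by one comprehension of the qualifying
-- indices plus a single endpoint slice (objective: simpler). Both A and B mutate `lines` in
-- place and return it; the mutation is identical, and the equivalence proved is about the
-- returned value.

-- ===== PORT A =====
-- A's forward loop with break: index of the first qualifying point, len(line) if none.
def pvScanFwd (threshold : Int) : List (Int × Int × Int) → Nat
  | [] => 0
  | p :: rest => if p.2.2 ≥ threshold then 0 else pvScanFwd threshold rest + 1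

-- A's backward loop with break over the index list range(len(line)-1, 0, -1).
def pvScanBack (line : List (Int × Int × Int)) (threshold : Int) : List Int → List (Int × Int × Int)
  | [] => line
  | j :: js =>
    match PySem.List.pyGet? line j with
    | some p =>
      if p.2.2 ≥ threshold then PySem.List.slice line (some 0) (some j)
      else pvScanBack line threshold js
    | none => pvScanBack line threshold js

-- A's loop body for one line (the write lines[lineInd] = … per index makes the loop a map).
def pvTrimLine (threshold : Int) (line : List (Int × Int × Int)) : List (Int × Int × Int) :=
  let startInd := pvScanFwd threshold line
  let line2 := PySem.List.slice line (some (startInd : Int)) none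
  pvScanBack line2 threshold (PySem.List.pyRange ((line2.length : Int) - 1) 0 (-1))

def limit_lines_to_relevant_edges (lines : List (List (Int × Int × Int))) (threshold : Int) : List (List (Int × Int × Int)) :=
  lines.map (pvTrimLine threshold)

-- ===== PORT B =====
-- line[j][2] >= threshold, for j from range(len(line)).
def pvQualCheck (threshold : Int) (line : List (Int × Int × Int)) (j : Nat) : Bool :=
  match getElem? line j with
  | some p => decide (threshold ≤ p.2.2)
  | none => false

-- q = [j for j in range(len(line)) if line[j][2] >= threshold]
def pvQual (threshold : Int) (line : List (Int × Int × Int)) : List Nat :=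
  (List.range line.length).filter (pvQualCheck threshold line)

def pvCutLine (threshold : Int) (line : List (Int × Int × Int)) : List (Int × Int × Int) :=
  match pvQual threshold line with
  | [] => PySem.List.slice line (some (line.length : Int)) none
  | [a] => PySem.List.slice line (some (a : Int)) none
  | a :: b :: t =>
    PySem.List.slice line (some (a : Int)) (some (((b :: t).getLast (List.cons_ne_nil b t) : Nat) : Int))

def limit_lines_to_relevant_edges_alt (lines : List (List (Int × Int × Int))) (threshold : Int) : List (List (Int × Int × Int)) :=
  lines.map (pvCutLine threshold)

-- ===== PRECONDITION & SPEC =====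
def Spec_limit_lines_to_relevant_edges (lines : List (List (Int × Int × Int))) (threshold : Int) (out : List (List (Int × Int × Int))) : Prop := out = limit_lines_to_relevant_edges_alt lines threshold
instance (lines : List (List (Int × Int × Int))) (threshold : Int) (out : List (List (Int × Int × Int))) : Decidable (Spec_limit_lines_to_relevant_edges lines threshold out) := by unfold Spec_limit_lines_to_relevant_edges; infer_instance

-- ===== CLAIM (what is proved, stated in full; the proofs are below) =====
def Claim_equal_limit_lines_to_relevant_edges : Prop := ∀ (lines : List (List (Int × Int × Int))) (threshold : Int), Dom_limit_lines_to_relevant_edges lines threshold → Spec_limit_lines_to_relevant_edges lines threshold (limit_lines_to_relevant_edges lines threshold)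

-- ===== LEMMAS AND PROOFS =====

-- the descending index list range(m, 0, -1) as a map over List.range
theorem pvPyRange_desc (m : Nat) :
    PySem.List.pyRange (m : Int) 0 (-1) =
      (List.range m).map (fun k => (m : Int) + (-1) * (k : Nat)) := by
  unfold PySem.List.pyRange
  rcases Nat.eq_zero_or_pos m with h | h
  · subst h; norm_num
  · have h' : (0:Int) < (m:Int) := by exact_mod_cast h
    rw [if_neg (by norm_num : ¬((-1:Int) = 0)),
      if_neg (by norm_num : ¬((0:Int) < -1)), if_pos h']
    norm_num

theorem pvPyRange_desc_zero : PySem.List.pyRange (0 : Int) 0 (-1) = [] := by decide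

theorem pvPyRange_desc_succ (m : Nat) :
    PySem.List.pyRange ((m : Int) + 1) 0 (-1) = ((m : Int) + 1) :: PySem.List.pyRange (m : Int) 0 (-1) := by
  have hc : ((m : Int) + 1) = (((m + 1 : Nat)) : Int) := by push_cast; ring
  rw [hc, pvPyRange_desc (m + 1), pvPyRange_desc m, List.range_succ_eq_map, List.map_cons,
    List.map_map]
  refine List.cons_eq_cons.mpr ⟨by norm_num, ?_⟩
  refine List.map_congr_left (fun k _ => ?_)
  simp only [Function.comp_apply]
  push_cast
  ring

-- the largest qualifying index in [1..m], computed top-down (A's backward scan result)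
def pvLastQ (threshold : Int) (line : List (Int × Int × Int)) : Nat → Option Nat
  | 0 => none
  | m + 1 => if pvQualCheck threshold line (m + 1) then some (m + 1) else pvLastQ threshold line m

theorem pvScanBack_eq (threshold : Int) (line : List (Int × Int × Int)) (m : Nat)
    (hm : m < line.length) :
    pvScanBack line threshold (PySem.List.pyRange (m : Int) 0 (-1)) =
      (match pvLastQ threshold line m with
       | some j => List.take j line
       | none => line) := by
  induction m with
  | zero =>
    rw [Nat.cast_zero, pvPyRange_desc_zero]
    simp [pvScanBack, pvLastQ]
  | succ m ih =>
    have hlt : m + 1 < line.length := hm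
    have hcast : (((m + 1 : Nat)) : Int) = ((m : Int) + 1) := by push_cast; ring
    rcases hg : getElem? line (m + 1) with _ | pt
    · have hnone := List.getElem?_eq_none_iff.mp hg
      omega
    · have hpg : PySem.List.pyGet? line ((m : Int) + 1) = some pt := by
        rw [← hcast, PySem.List.pyGet?_natCast]
        exact hg
      rw [hcast, pvPyRange_desc_succ]
      simp only [pvScanBack, hpg, ge_iff_le]
      have hqc : pvQualCheck threshold line (m + 1) = decide (threshold ≤ pt.2.2) := by
        simp [pvQualCheck, hg]
      by_cases hcase : threshold ≤ pt.2.2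
      · rw [if_pos hcase]
        have hlast : pvLastQ threshold line (m + 1) = some (m + 1) := by
          simp [pvLastQ, hqc, hcase]
        rw [hlast, show ((m : Int) + 1) = (((m + 1 : Nat)) : Int) from hcast.symm]
        rw [PySem.List.slice_zero_start, PySem.List.slice_to_natCast]
      · rw [if_neg hcase]
        have hlast : pvLastQ threshold line (m + 1) = pvLastQ threshold line m := by
          simp [pvLastQ, hqc, hcase]
        rw [hlast]
        exact ih (by omega)

theorem pvLastQ_eq_filter (threshold : Int) (line : List (Int × Int × Int)) (m : Nat) :
    pvLastQ threshold line m =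
      (((List.range m).filter (fun k => pvQualCheck threshold line (k + 1))).getLast?).map (· + 1) := by
  induction m with
  | zero => simp [pvLastQ]
  | succ m ih =>
    rw [List.range_succ, List.filter_append]
    by_cases h : pvQualCheck threshold line (m + 1)
    · simp [pvLastQ, h]
    · simp [pvLastQ, h, ih]

theorem pvQualCheck_cons_succ (threshold : Int) (p : Int × Int × Int)
    (rest : List (Int × Int × Int)) (k : Nat) :
    pvQualCheck threshold (p :: rest) (k + 1) = pvQualCheck threshold rest k := by
  simp [pvQualCheck]

theorem pvQual_cons (threshold : Int) (p : Int × Int × Int) (rest : List (Int × Int × Int)) :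
    pvQual threshold (p :: rest) =
      (if pvQualCheck threshold (p :: rest) 0 then [0] else []) ++
        (pvQual threshold rest).map (· + 1) := by
  have hstep : List.filter (pvQualCheck threshold (p :: rest) ∘ Nat.succ) (List.range rest.length)
      = List.filter (pvQualCheck threshold rest) (List.range rest.length) :=
    List.filter_congr (fun k _ => by
      simpa [Function.comp, Nat.succ_eq_add_one] using pvQualCheck_cons_succ threshold p rest k)
  unfold pvQual
  rw [List.length_cons, List.range_succ_eq_map, List.filter_cons, List.filter_map, hstep]
  have hmapsucc : List.map Nat.succ (List.filter (pvQualCheck threshold rest) (List.range rest.length))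
      = List.map (· + 1) (List.filter (pvQualCheck threshold rest) (List.range rest.length)) :=
    List.map_congr_left (fun _ _ => rfl)
  rw [hmapsucc]
  by_cases h0 : pvQualCheck threshold (p :: rest) 0 <;> simp [h0]

theorem pvGetLast?_map : ∀ (t : List Nat), (t.map (· + 1)).getLast? = t.getLast?.map (· + 1)
  | [] => by simp
  | [c] => by simp
  | c :: d :: t => by
    simp only [List.map_cons, List.getLast?_cons_cons]
    simpa [List.map_cons] using pvGetLast?_map (d :: t)

theorem pvGetLast_shift (a : Nat) (t : List Nat) (h : (a + 1) :: t.map (· + 1) ≠ [])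
    (h2 : a :: t ≠ []) :
    ((a + 1) :: t.map (· + 1)).getLast h = (a :: t).getLast h2 + 1 := by
  have e1 : ((a + 1) :: t.map (· + 1)).getLast? = some (((a + 1) :: t.map (· + 1)).getLast h) :=
    List.getLast?_eq_some_getLast h
  have e2 : (a :: t).getLast? = some ((a :: t).getLast h2) := List.getLast?_eq_some_getLast h2
  have e3 : ((a + 1) :: t.map (· + 1)).getLast? = some ((a :: t).getLast h2 + 1) := by
    rw [show ((a + 1) :: t.map (· + 1)) = (a :: t).map (· + 1) from by rw [List.map_cons],
      pvGetLast?_map (a :: t), e2]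
    rfl
  exact Option.some.inj (e1.symm.trans e3)

theorem pvTrim_cons_skip (threshold : Int) (p : Int × Int × Int) (rest : List (Int × Int × Int))
    (hp : ¬ (p.2.2 ≥ threshold)) :
    pvTrimLine threshold (p :: rest) = pvTrimLine threshold rest := by
  have h1 : pvScanFwd threshold (p :: rest) = pvScanFwd threshold rest + 1 := by
    simp [pvScanFwd, hp]
  simp only [pvTrimLine, h1, PySem.List.slice_from_natCast, List.drop_succ_cons]

theorem pvCut_cons_skip (threshold : Int) (p : Int × Int × Int) (rest : List (Int × Int × Int))
    (hp : ¬ (p.2.2 ≥ threshold)) :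
    pvCutLine threshold (p :: rest) = pvCutLine threshold rest := by
  have h0 : pvQualCheck threshold (p :: rest) 0 = false := by
    simp [pvQualCheck]
    exact not_le.mp hp
  have hq : pvQual threshold (p :: rest) = (pvQual threshold rest).map (· + 1) := by
    rw [pvQual_cons, h0]; simp
  unfold pvCutLine
  rw [hq]
  rcases hqr : pvQual threshold rest with _ | ⟨a, t⟩
  · simp only [List.map_nil]
    rw [PySem.List.slice_from_natCast, PySem.List.slice_from_natCast]
    simp
  · rcases t with _ | ⟨b, t'⟩
    · simp only [List.map_cons, List.map_nil]
      rw [PySem.List.slice_from_natCast, PySem.List.slice_from_natCast]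
      simp
    · simp only [List.map_cons]
      rw [pvGetLast_shift b t' (List.cons_ne_nil _ _) (List.cons_ne_nil b t')]
      rw [PySem.List.slice_natCast, PySem.List.slice_natCast]
      simp [Nat.add_sub_add_right]

theorem pvLine_eq_head (threshold : Int) (p : Int × Int × Int) (rest : List (Int × Int × Int))
    (hp : p.2.2 ≥ threshold) :
    pvTrimLine threshold (p :: rest) = pvCutLine threshold (p :: rest) := by
  have h1 : pvScanFwd threshold (p :: rest) = 0 := by simp [pvScanFwd, hp]
  have h0 : pvQualCheck threshold (p :: rest) 0 = true := by
    simp [pvQualCheck]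
    exact hp
  have hq : pvQual threshold (p :: rest) = 0 :: (pvQual threshold rest).map (· + 1) := by
    rw [pvQual_cons, h0]; simp
  have hA : pvTrimLine threshold (p :: rest) =
      pvScanBack (p :: rest) threshold (PySem.List.pyRange ((rest.length : Nat) : Int) 0 (-1)) := by
    simp only [pvTrimLine, h1, Nat.cast_zero, PySem.List.slice_zero_start,
      PySem.List.slice_none_none]
    have harg : (((p :: rest).length : Nat) : Int) - 1 = ((rest.length : Nat) : Int) := by
      rw [List.length_cons]; push_cast; ring
    rw [harg]
  rw [hA, pvScanBack_eq threshold (p :: rest) rest.length (by simp)]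
  have hfc : (List.range rest.length).filter (fun k => pvQualCheck threshold (p :: rest) (k + 1))
      = (List.range rest.length).filter (pvQualCheck threshold rest) :=
    List.filter_congr (fun k _ => pvQualCheck_cons_succ threshold p rest k)
  have hlq : pvLastQ threshold (p :: rest) rest.length =
      ((pvQual threshold rest).getLast?).map (· + 1) := by
    rw [pvLastQ_eq_filter, hfc]; rfl
  rw [hlq]
  unfold pvCutLine
  rw [hq]
  rcases hqr : pvQual threshold rest with _ | ⟨a, t⟩
  · simp only [List.getLast?_nil, List.map_nil]
    rw [PySem.List.slice_from_natCast]
    simp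
  · have hl? : (a :: t).getLast? = some ((a :: t).getLast (List.cons_ne_nil a t)) :=
      List.getLast?_eq_some_getLast (List.cons_ne_nil a t)
    rw [hl?]
    simp only [Option.map_some, List.map_cons]
    rw [pvGetLast_shift a t (List.cons_ne_nil _ _) (List.cons_ne_nil a t)]
    rw [show (((0 : Nat)) : Int) = (0 : Int) from by norm_num]
    rw [PySem.List.slice_zero_start, PySem.List.slice_to_natCast]

theorem pvLine_eq (threshold : Int) : ∀ (line : List (Int × Int × Int)),
    pvTrimLine threshold line = pvCutLine threshold line := by
  intro line
  induction line with
  | nil =>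
    have hR' : PySem.List.pyRange (-1 : Int) 0 (-1) = [] := by decide
    simp [pvTrimLine, pvCutLine, pvQual, pvScanFwd, pvScanBack, hR']
  | cons p rest ih =>
    by_cases hp : p.2.2 ≥ threshold
    · exact pvLine_eq_head threshold p rest hp
    · rw [pvTrim_cons_skip threshold p rest hp, pvCut_cons_skip threshold p rest hp]
      exact ih

-- ===== VERDICT (by name: the statement is the Claim_ definition above) =====
theorem limit_lines_to_relevant_edges_spec : Claim_equal_limit_lines_to_relevant_edges := by
  intro lines threshold _
  unfold Spec_limit_lines_to_relevant_edges limit_lines_to_relevant_edges limit_lines_to_relevant_edges_alt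
  exact List.map_congr_left (fun l _ => pvLine_eq threshold l)
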